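-- pv_equiv track=rewrite | github.com/robbyyt/arms-2021 | src/create_graph.py | convert_index
-- ===== SOURCE A (Python) =====
-- def convert_index(corpus_normalized_index, corpus):
--     index = 0
--     for i in range(len(corpus)):
--         if corpus[i]:
--             if index == corpus_normalized_index:
--                 return index
--             else:
--                 index += 1
-- ===== SOURCE B (Python) =====
-- def convert_index(corpus_normalized_index, corpus):
--     count = sum(1 for s in corpus if s)
--     if 0 <= corpus_normalized_index < count:
--         return corpus_normalized_index
--     return None
-- ===== Notes on version B (the rewrite author's own statement) =====
-- stated objective: simpler
-- what changed: Replaces the indexed scan with early return by a single truthy count followed by a bounds check, returning the target directly.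
import Mathlib
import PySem

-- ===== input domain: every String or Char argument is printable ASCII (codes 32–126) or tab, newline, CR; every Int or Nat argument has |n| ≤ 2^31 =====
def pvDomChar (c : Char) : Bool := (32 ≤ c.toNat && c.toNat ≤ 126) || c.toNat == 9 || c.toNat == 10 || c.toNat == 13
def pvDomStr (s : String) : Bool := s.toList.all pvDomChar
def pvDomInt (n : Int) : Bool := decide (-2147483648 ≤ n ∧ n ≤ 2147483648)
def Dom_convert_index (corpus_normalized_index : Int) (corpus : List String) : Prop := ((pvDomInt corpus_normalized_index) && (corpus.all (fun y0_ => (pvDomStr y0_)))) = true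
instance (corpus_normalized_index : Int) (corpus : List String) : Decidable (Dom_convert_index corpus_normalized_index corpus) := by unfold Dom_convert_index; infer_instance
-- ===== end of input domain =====

-- B replaces A's indexed early-return scan by a single truthy count plus a bounds check (objective: simpler).


-- ===== PORT A =====
-- helper: the for-loop of A, carrying the running truthy counter `index`
def convert_index_go (target : Int) : List String → Int → Option Int
  | [], _ => none
  | s :: rest, index =>
      if s ≠ "" then
        if index = target then some index
        else convert_index_go target rest (index + 1)
      else convert_index_go target rest index

def convert_index (corpus_normalized_index : Int) (corpus : List String) : Option Int :=
  convert_index_go corpus_normalized_index corpus 0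

-- ===== PORT B =====
def convert_index_alt (corpus_normalized_index : Int) (corpus : List String) : Option Int :=
  let count : Int := (corpus.filter (fun s => s ≠ "")).length
  if 0 ≤ corpus_normalized_index ∧ corpus_normalized_index < count then
    some corpus_normalized_index
  else none

-- ===== PRECONDITION & SPEC =====
def Spec_convert_index (corpus_normalized_index : Int) (corpus : List String) (out : Option Int) : Prop := out = convert_index_alt corpus_normalized_index corpus
instance (corpus_normalized_index : Int) (corpus : List String) (out : Option Int) : Decidable (Spec_convert_index corpus_normalized_index corpus out) := by unfold Spec_convert_index; infer_instance

-- ===== CLAIM (what is proved, stated in full; the proofs are below) =====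
def Claim_equal_convert_index : Prop := ∀ (corpus_normalized_index : Int) (corpus : List String), Dom_convert_index corpus_normalized_index corpus → Spec_convert_index corpus_normalized_index corpus (convert_index corpus_normalized_index corpus)

-- ===== LEMMAS AND PROOFS =====

-- ===== VERDICT (by name: the statement is the Claim_ definition above) =====
-- A's loop, started at counter `index`, returns `some target` iff `target` lies in
-- [index, index + number of truthy entries), and `none` otherwise.
theorem convert_index_go_eq (target : Int) (corpus : List String) :
    ∀ index : Int, convert_index_go target corpus index =
      if index ≤ target ∧ target < index + ((corpus.filter (fun s => s ≠ "")).length : Int)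
      then some target else none := by
  induction corpus with
  | nil => intro index; simp [convert_index_go]
  | cons s rest ih =>
    intro index
    by_cases hs : s ≠ ""
    · rw [convert_index_go]
      simp only [if_pos hs]
      by_cases ht : index = target
      · subst ht
        rw [if_pos rfl]
        simp only [List.filter_cons, decide_eq_true_eq, if_pos hs, List.length_cons]
        rw [if_pos (And.intro (le_refl index) (by push_cast; omega))]
      · rw [if_neg ht, ih]
        simp only [List.filter_cons, decide_eq_true_eq, if_pos hs, List.length_cons]
        push_cast
        by_cases h : index + 1 ≤ target ∧ target < index + 1 + ((rest.filter (fun s => s ≠ "")).length : Int)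
        · rw [if_pos h, if_pos ⟨by omega, by omega⟩]
        · rw [if_neg h, if_neg (by omega)]
    · rw [convert_index_go]
      simp only [if_neg hs, ih]
      simp only [List.filter_cons, decide_eq_true_eq, if_neg hs]

theorem convert_index_spec : Claim_equal_convert_index := by
  intro target corpus _
  unfold Spec_convert_index convert_index convert_index_alt
  rw [convert_index_go_eq]
  by_cases h : 0 ≤ target ∧ target < ((corpus.filter (fun s => s ≠ "")).length : Int)
  · rw [if_pos ⟨h.1, by omega⟩, if_pos h]
  · rw [if_neg (by omega), if_neg h]
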